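-- pv_equiv track=rewrite | github.com/Patlu29/DSA | 3_O(n + m).py | result
-- ===== SOURCE A (Python) =====
-- def result(nums1,nums2):
--     result = [] # --> 1
--
--     for num in nums1: # --> n
--         result.append(num) # --> 1
--
--     for i, num in enumerate(nums2): # --> m
--         if i >= len(result): # --> 1
--             result.append(1) # --> 1
--         result[i] *= 2 # --> 1
--
--     return result# --> 1
-- ===== SOURCE B (Python) =====
-- def result(nums1, nums2):
--     n, m = len(nums1), len(nums2)
--     if m <= n:
--         return [x * 2 for x in nums1[:m]] + nums1[m:]
--     return [x * 2 for x in nums1] + [2] * (m - n)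
-- ===== Notes on version B (the rewrite author's own statement) =====
-- stated objective: simpler
-- what changed: Replaces the copy-then-index-mutate-with-conditional-append loops by a length comparison plus slicing/concatenation: doubled prefix + untouched suffix when len(nums2)<=len(nums1), else doubled nums1 + a run of 2s.
import Mathlib
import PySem

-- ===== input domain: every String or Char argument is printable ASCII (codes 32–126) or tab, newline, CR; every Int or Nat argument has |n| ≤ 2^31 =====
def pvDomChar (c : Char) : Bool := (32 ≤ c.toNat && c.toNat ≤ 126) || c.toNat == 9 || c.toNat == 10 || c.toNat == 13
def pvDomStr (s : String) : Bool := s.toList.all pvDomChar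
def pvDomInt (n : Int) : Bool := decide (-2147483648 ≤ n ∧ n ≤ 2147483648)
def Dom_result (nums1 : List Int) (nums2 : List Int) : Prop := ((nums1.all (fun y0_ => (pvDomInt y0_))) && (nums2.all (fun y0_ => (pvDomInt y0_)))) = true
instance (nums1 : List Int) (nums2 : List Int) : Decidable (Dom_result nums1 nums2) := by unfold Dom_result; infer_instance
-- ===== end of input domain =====

-- B replaces A's copy-then-index-mutate-with-conditional-append loops by a length
-- comparison plus slicing/concatenation (objective: simpler).

-- ===== PORT A =====
-- one step of A's second loop: 'if i >= len(result): result.append(1); result[i] *= 2'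
def resultStep (acc : List Int) (p : Int × Int) : List Int :=
  let acc := if p.1 ≥ (acc.length : Int) then acc ++ [1] else acc
  acc.set p.1.toNat (acc.getD p.1.toNat 0 * 2)

def result (nums1 : List Int) (nums2 : List Int) : List Int :=
  let r := nums1.foldl (fun acc num => acc ++ [num]) []
  (PySem.List.enumerate nums2).foldl resultStep r

-- ===== PORT B =====
def result_alt (nums1 : List Int) (nums2 : List Int) : List Int :=
  let n := nums1.length
  let m := nums2.length
  if m ≤ n then (nums1.take m).map (· * 2) ++ nums1.drop m
  else nums1.map (· * 2) ++ List.replicate (m - n) 2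

-- ===== PRECONDITION & SPEC =====
def Spec_result (nums1 : List Int) (nums2 : List Int) (out : List Int) : Prop := out = result_alt nums1 nums2
instance (nums1 : List Int) (nums2 : List Int) (out : List Int) : Decidable (Spec_result nums1 nums2 out) := by unfold Spec_result; infer_instance

-- ===== CLAIM (what is proved, stated in full; the proofs are below) =====
def Claim_equal_result : Prop := ∀ (nums1 : List Int) (nums2 : List Int), Dom_result nums1 nums2 → Spec_result nums1 nums2 (result nums1 nums2)

-- ===== LEMMAS AND PROOFS =====

theorem foldl_append_id (l acc : List Int) :
    l.foldl (fun a x => a ++ [x]) acc = acc ++ l := by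
  induction l generalizing acc with
  | nil => simp
  | cons x l ih => simp [List.foldl, ih]

-- the loop while the index is still inside the list: doubles in place
theorem fold_inside (l pre rest : List Int) (h : l.length ≤ rest.length) :
    (PySem.List.enumerate l (pre.length : Int)).foldl resultStep (pre ++ rest)
      = pre ++ (rest.take l.length).map (· * 2) ++ rest.drop l.length := by
  induction l generalizing pre rest with
  | nil => simp
  | cons v l ih =>
    cases rest with
    | nil => simp at h
    | cons r0 rest' =>
      rw [PySem.List.enumerate_cons, List.foldl_cons]
      have hstep : resultStep (pre ++ r0 :: rest') ((pre.length : Int), v)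
          = (pre ++ [r0 * 2]) ++ rest' := by
        have hlt : ¬ ((pre.length : Int) ≥ ((pre ++ r0 :: rest').length : Int)) := by
          simp
        simp only [resultStep, hlt, if_neg, not_false_iff]
        have hset : (pre ++ r0 :: rest').set pre.length (r0 * 2) = pre ++ (r0 * 2) :: rest' := by
          rw [List.set_append_right _ _ (Nat.le_refl _)]
          simp
        simp [Int.toNat_natCast, hset]
      rw [hstep]
      have hlen : ((pre.length : Int) + 1) = (((pre ++ [r0 * 2]).length : Nat) : Int) := by
        simp
      rw [hlen, ih (pre ++ [r0 * 2]) rest' (by simpa using Nat.le_of_succ_le_succ h)]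
      simp

-- the loop once the index has reached the end: appends 2s
theorem fold_outside (l acc : List Int) :
    (PySem.List.enumerate l (acc.length : Int)).foldl resultStep acc
      = acc ++ List.replicate l.length 2 := by
  induction l generalizing acc with
  | nil => simp
  | cons v l ih =>
    rw [PySem.List.enumerate_cons, List.foldl_cons]
    have hstep : resultStep acc ((acc.length : Int), v) = acc ++ [2] := by
      have hge : ((acc.length : Int) ≥ ((acc ++ [1]).length : Int)) = False := by simp
      simp only [resultStep, ge_iff_le, le_refl, if_pos]
      simp [Int.toNat_natCast, List.getD, List.set_append_right _ _ (Nat.le_refl acc.length)]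
    rw [hstep]
    have hlen : ((acc.length : Int) + 1) = (((acc ++ [2]).length : Nat) : Int) := by simp
    rw [hlen, ih (acc ++ [2])]
    simp [List.replicate_succ]

-- ===== VERDICT (by name: the statement is the Claim_ definition above) =====
theorem result_spec : Claim_equal_result := by
  intro nums1 nums2 _
  unfold Spec_result result result_alt
  rw [foldl_append_id]
  simp only [List.nil_append]
  by_cases h : nums2.length ≤ nums1.length
  · have h0 : (PySem.List.enumerate nums2 ((([] : List Int).length : Nat) : Int)).foldl resultStep (([] : List Int) ++ nums1)
        = ([] : List Int) ++ (nums1.take nums2.length).map (· * 2) ++ nums1.drop nums2.length :=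
      fold_inside nums2 [] nums1 h
    simp only [List.length_nil, Nat.cast_zero, List.nil_append] at h0
    rw [h0, if_pos h]
  · have hsplit : nums2 = nums2.take nums1.length ++ nums2.drop nums1.length := by
      simp
    have hlen1 : (nums2.take nums1.length).length = nums1.length :=
      List.length_take_of_le (Nat.le_of_lt (Nat.lt_of_not_le h))
    conv_lhs => rw [hsplit]
    rw [PySem.List.enumerate_append, List.foldl_append]
    have h1 : (PySem.List.enumerate (nums2.take nums1.length) ((([] : List Int).length : Nat) : Int)).foldl resultStep (([] : List Int) ++ nums1)
        = ([] : List Int) ++ (nums1.take (nums2.take nums1.length).length).map (· * 2)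
            ++ nums1.drop (nums2.take nums1.length).length :=
      fold_inside (nums2.take nums1.length) [] nums1 (by omega)
    simp only [List.length_nil, Nat.cast_zero, List.nil_append, hlen1, List.take_length,
      List.drop_length, List.append_nil] at h1
    rw [h1]
    have hacc : ((0 : Int) + ((nums2.take nums1.length).length : Int))
        = (((nums1.map (· * 2)).length : Nat) : Int) := by
      simp [hlen1]
    rw [hacc, fold_outside]
    rw [if_neg h]
    congr 1
    simp
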